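-- pv_equiv track=rewrite | github.com/tarrant-hightoppp/BackendApp-Core-C | app/services/ajur_audit_processor.py | _make_safe_for_filename
-- ===== SOURCE A (Python) =====
-- def _make_safe_for_filename(account: str) -> str:
--     """
--     Make an account name safe to use in a filename without changing its basic structure.
--
--     Args:
--         account: The account name to make safe
--
--     Returns:
--         A filename-safe version of the account name
--     """
--     # If the account is None or empty, return a default
--     if not account:
--         return "unknown"
--
--     # Replace any characters that would cause issues in filenames
--     # but preserve the original structure as much as possible
--     safe_chars = {
--         ':': '_',
--         ';': '_',
--         '\\': '_',
--         '/': '_',  # Keep slashes as they're part of account structure like 401/1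
--         '<': '_',
--         '>': '_',
--         '"': '_',
--         "'": '_',
--         '|': '_',
--         '?': '_',
--         '*': '_',
--         ' ': '_'
--     }
--
--     result = account
--     for char, replacement in safe_chars.items():
--         result = result.replace(char, replacement)
--
--     # Trim any excess whitespace
--     result = result.strip()
--
--     return result
-- ===== SOURCE B (Python) =====
-- _UNSAFE = frozenset(':;\\/<>"\'|?* ')
--
-- def _make_safe_for_filename(account: str) -> str:
--     if not account:
--         return "unknown"
--     return ''.join('_' if c in _UNSAFE else c for c in account).strip()
-- ===== Notes on version B (the rewrite author's own statement) =====
-- stated objective: idiomatic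
-- what changed: Replaces twelve sequential str.replace scans driven by a dict with one character-level pass using a frozenset membership test and ''.join, then strip.
import Mathlib
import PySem

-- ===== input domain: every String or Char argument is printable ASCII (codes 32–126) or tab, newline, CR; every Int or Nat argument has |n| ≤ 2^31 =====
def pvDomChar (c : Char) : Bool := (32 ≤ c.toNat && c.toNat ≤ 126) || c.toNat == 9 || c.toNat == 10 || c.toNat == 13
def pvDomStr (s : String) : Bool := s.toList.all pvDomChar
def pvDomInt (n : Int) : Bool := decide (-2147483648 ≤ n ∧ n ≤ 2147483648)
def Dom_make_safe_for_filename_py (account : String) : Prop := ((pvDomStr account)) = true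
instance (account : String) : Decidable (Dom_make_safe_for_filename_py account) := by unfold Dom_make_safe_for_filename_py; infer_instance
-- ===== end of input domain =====

-- B replaces A's twelve sequential str.replace passes with a single character-level pass (frozenset membership + join); return values proved equal on the whole domain.

-- ===== PORT A =====
def pvPairsA : List (String × String) :=
  [(":", "_"), (";", "_"), ("\\", "_"), ("/", "_"), ("<", "_"), (">", "_"),
   ("\"", "_"), ("'", "_"), ("|", "_"), ("?", "_"), ("*", "_"), (" ", "_")]

def make_safe_for_filename_py (account : String) : String :=
  if account = "" then "unknown"
  else
    let result := pvPairsA.foldl (fun r p => PySem.Str.replace r p.1 p.2) account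
    PySem.Str.strip result

-- ===== PORT B =====
def pvUnsafe (c : Char) : Bool :=
  c ∈ [':', ';', '\\', '/', '<', '>', '"', '\'', '|', '?', '*', ' ']

def make_safe_for_filename_py_alt (account : String) : String :=
  if account = "" then "unknown"
  else PySem.Str.strip (String.ofList (account.toList.map (fun c => if pvUnsafe c then '_' else c)))

-- ===== PRECONDITION & SPEC =====
def Spec_make_safe_for_filename_py (account : String) (out : String) : Prop := out = make_safe_for_filename_py_alt account
instance (account : String) (out : String) : Decidable (Spec_make_safe_for_filename_py account out) := by unfold Spec_make_safe_for_filename_py; infer_instance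

-- ===== CLAIM (what is proved, stated in full; the proofs are below) =====
def Claim_equal_make_safe_for_filename_py : Prop := ∀ (account : String), Dom_make_safe_for_filename_py account → Spec_make_safe_for_filename_py account (make_safe_for_filename_py account)

-- ===== LEMMAS AND PROOFS =====
theorem go_single (c r : Char) (l : List Char) : ∀ (fuel : Nat) (acc : List Char), l.length ≤ fuel →
    PySem.Chars.replace.go [c] [r] fuel l acc = acc.reverse ++ l.map (fun x => if x = c then r else x) := by
  induction l with
  | nil => intro fuel acc _; cases fuel <;> simp [PySem.Chars.replace.go]
  | cons a t ih =>
    intro fuel acc h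
    cases fuel with
    | zero => simp at h
    | succ n =>
      simp only [PySem.Chars.replace.go, List.isPrefixOf]
      by_cases hac : a = c
      · simp [hac, ih n (r :: acc) (by simpa using h)]
      · simp [hac, Ne.symm hac, ih n (a :: acc) (by simpa using h), beq_iff_eq]
theorem replace_single (c r : Char) (l : List Char) :
    PySem.Chars.replace l [c] [r] = l.map (fun x => if x = c then r else x) := by
  simp [PySem.Chars.replace, go_single c r l l.length [] le_rfl]
theorem fuse (ks : List Char) (c : Char) (hc : c ≠ '_') (l : List Char) :
    (l.map (fun x => if x ∈ ks then '_' else x)).map (fun x => if x = c then '_' else x)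
      = l.map (fun x => if x ∈ ks ++ [c] then '_' else x) := by
  rw [List.map_map]
  apply List.map_congr_left; intro x _
  by_cases h : x ∈ ks
  · simp [h, Function.comp]
  · by_cases h2 : x = c <;> simp [h, h2, Function.comp, hc] <;> tauto
theorem inner_eq (s : String) :
    (pvPairsA.foldl (fun r p => PySem.Str.replace r p.1 p.2) s).toList
      = s.toList.map (fun c => if pvUnsafe c then '_' else c) := by
  have t1 : (":" : String).toList = [':'] := rfl
  have t2 : (";" : String).toList = [';'] := rfl
  have t3 : ("\\" : String).toList = ['\\'] := rfl
  have t4 : ("/" : String).toList = ['/'] := rfl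
  have t5 : ("<" : String).toList = ['<'] := rfl
  have t6 : (">" : String).toList = ['>'] := rfl
  have t7 : ("\"" : String).toList = ['"'] := rfl
  have t8 : ("'" : String).toList = ['\''] := rfl
  have t9 : ("|" : String).toList = ['|'] := rfl
  have t10 : ("?" : String).toList = ['?'] := rfl
  have t11 : ("*" : String).toList = ['*'] := rfl
  have t12 : ("_" : String).toList = ['_'] := rfl
  have t13 : (" " : String).toList = [' '] := rfl
  simp only [pvPairsA, List.foldl_cons, List.foldl_nil, PySem.Str.toList_replace,
    t1,t2,t3,t4,t5,t6,t7,t8,t9,t10,t11,t12,t13, replace_single]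
  have e1 : (fun x => if x = ':' then '_' else x) = (fun x : Char => if x ∈ [':'] then '_' else x) := by
    funext x; simp
  rw [e1]
  rw [fuse ([':']) ';' (by decide)]
  rw [fuse ([':'] ++ [';']) '\\' (by decide)]
  rw [fuse ([':'] ++ [';'] ++ ['\\']) '/' (by decide)]
  rw [fuse ([':'] ++ [';'] ++ ['\\'] ++ ['/']) '<' (by decide)]
  rw [fuse ([':'] ++ [';'] ++ ['\\'] ++ ['/'] ++ ['<']) '>' (by decide)]
  rw [fuse ([':'] ++ [';'] ++ ['\\'] ++ ['/'] ++ ['<'] ++ ['>']) '"' (by decide)]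
  rw [fuse ([':'] ++ [';'] ++ ['\\'] ++ ['/'] ++ ['<'] ++ ['>'] ++ ['"']) '\'' (by decide)]
  rw [fuse ([':'] ++ [';'] ++ ['\\'] ++ ['/'] ++ ['<'] ++ ['>'] ++ ['"'] ++ ['\'']) '|' (by decide)]
  rw [fuse ([':'] ++ [';'] ++ ['\\'] ++ ['/'] ++ ['<'] ++ ['>'] ++ ['"'] ++ ['\''] ++ ['|']) '?' (by decide)]
  rw [fuse ([':'] ++ [';'] ++ ['\\'] ++ ['/'] ++ ['<'] ++ ['>'] ++ ['"'] ++ ['\''] ++ ['|'] ++ ['?']) '*' (by decide)]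
  rw [fuse ([':'] ++ [';'] ++ ['\\'] ++ ['/'] ++ ['<'] ++ ['>'] ++ ['"'] ++ ['\''] ++ ['|'] ++ ['?'] ++ ['*']) ' ' (by decide)]
  apply List.map_congr_left; intro x _
  by_cases h : pvUnsafe x = true
  · have hm : x ∈ ([':'] ++ [';'] ++ ['\\'] ++ ['/'] ++ ['<'] ++ ['>'] ++ ['"'] ++ ['\''] ++ ['|'] ++ ['?'] ++ ['*'] ++ [' ']) := by
      simp only [pvUnsafe, List.mem_cons, decide_eq_true_eq, List.not_mem_nil, or_false] at h
      simp only [List.mem_append, List.mem_cons, List.not_mem_nil, or_false]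
      tauto
    rw [if_pos hm, h, if_pos rfl]
  · have hm : x ∉ ([':'] ++ [';'] ++ ['\\'] ++ ['/'] ++ ['<'] ++ ['>'] ++ ['"'] ++ ['\''] ++ ['|'] ++ ['?'] ++ ['*'] ++ [' ']) := by
      simp only [pvUnsafe, Bool.not_eq_true, decide_eq_false_iff_not, List.mem_cons,
        List.not_mem_nil, or_false] at h
      simp only [List.mem_append, List.mem_cons, List.not_mem_nil, or_false]
      tauto
    rw [if_neg hm, if_neg h]

-- ===== VERDICT (by name: the statement is the Claim_ definition above) =====
theorem make_safe_for_filename_py_spec : Claim_equal_make_safe_for_filename_py := by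
  intro account _
  unfold Spec_make_safe_for_filename_py make_safe_for_filename_py make_safe_for_filename_py_alt
  by_cases h : account = ""
  · simp [h]
  · simp only [h, if_false]
    refine congrArg PySem.Str.strip (String.toList_inj.mp ?_)
    rw [inner_eq]
    simp
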